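-- pv_equiv track=rewrite | github.com/yafitzdev/fitz-graveyard | fitz_graveyard/planning/pipeline/stages/base.py | _count_unclosed_delimiters
-- ===== SOURCE A (Python) =====
-- def _count_unclosed_delimiters(text: str) -> tuple[int, int, bool]:
--     """Count unclosed { and [ accounting for JSON string escaping.
--
--     Returns (unclosed_braces, unclosed_brackets, ended_in_string).
--     """
--     braces = 0
--     brackets = 0
--     in_string = False
--     escape = False
--     for ch in text:
--         if escape:
--             escape = False
--             continue
--         if ch == '\\' and in_string:
--             escape = True
--             continue
--         if ch == '"':
--             in_string = not in_string
--             continue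
--         if in_string:
--             continue
--         if ch == '{':
--             braces += 1
--         elif ch == '}':
--             braces -= 1
--         elif ch == '[':
--             brackets += 1
--         elif ch == ']':
--             brackets -= 1
--     return max(braces, 0), max(brackets, 0), in_string
-- ===== SOURCE B (Python) =====
-- def _count_unclosed_delimiters(text: str) -> tuple[int, int, bool]:
--     """Two-pass version: strip string literals first, then count delimiters."""
--     outside = []
--     in_string = False
--     escape = False
--     for ch in text:
--         if escape:
--             escape = False
--         elif in_string:
--             if ch == '\\':
--                 escape = True
--             elif ch == '"':
--                 in_string = False
--         elif ch == '"':
--             in_string = True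
--         else:
--             outside.append(ch)
--     braces = outside.count('{') - outside.count('}')
--     brackets = outside.count('[') - outside.count(']')
--     return max(braces, 0), max(brackets, 0), in_string
-- ===== Notes on version B (the rewrite author's own statement) =====
-- stated objective: alternative
-- what changed: B splits A's single counting state machine into two passes: a first pass that only strips string literals (collecting the characters outside strings) and a second pass that counts the four delimiters in the stripped text by list.count.
import Mathlib
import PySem

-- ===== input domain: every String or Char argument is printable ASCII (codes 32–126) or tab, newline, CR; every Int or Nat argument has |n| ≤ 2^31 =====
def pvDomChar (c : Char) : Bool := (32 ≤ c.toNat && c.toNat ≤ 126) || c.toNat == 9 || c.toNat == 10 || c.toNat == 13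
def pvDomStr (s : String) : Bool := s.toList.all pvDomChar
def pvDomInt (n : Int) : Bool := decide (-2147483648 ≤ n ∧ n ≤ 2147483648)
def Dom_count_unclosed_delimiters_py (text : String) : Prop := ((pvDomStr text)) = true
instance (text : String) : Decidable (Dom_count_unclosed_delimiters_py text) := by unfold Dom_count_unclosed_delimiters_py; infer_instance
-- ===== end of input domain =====

-- B replaces A's single counting state machine by two passes: strip string literals, then count delimiters in the stripped text (objective: alternative decomposition).
-- ===== PORT A =====
def pvStepA (st : Int × Int × Bool × Bool) (ch : Char) : Int × Int × Bool × Bool :=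
  let (braces, brackets, in_string, escape) := st
  if escape then (braces, brackets, in_string, false)
  else if ch = '\\' ∧ in_string then (braces, brackets, in_string, true)
  else if ch = '"' then (braces, brackets, !in_string, escape)
  else if in_string then st
  else if ch = '{' then (braces + 1, brackets, in_string, escape)
  else if ch = '}' then (braces - 1, brackets, in_string, escape)
  else if ch = '[' then (braces, brackets + 1, in_string, escape)
  else if ch = ']' then (braces, brackets - 1, in_string, escape)
  else st

def count_unclosed_delimiters_py (text : String) : Int × Int × Bool :=
  let r := text.toList.foldl pvStepA (0, 0, false, false)
  (max r.1 0, max r.2.1 0, r.2.2.1)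

-- ===== PORT B =====
def pvStepB (st : List Char × Bool × Bool) (ch : Char) : List Char × Bool × Bool :=
  let (outside, in_string, escape) := st
  if escape then (outside, in_string, false)
  else if in_string then
    if ch = '\\' then (outside, in_string, true)
    else if ch = '"' then (outside, false, escape)
    else st
  else if ch = '"' then (outside, true, escape)
  else (outside ++ [ch], in_string, escape)

def count_unclosed_delimiters_py_alt (text : String) : Int × Int × Bool :=
  let r := text.toList.foldl pvStepB ([], false, false)
  let braces : Int := (PySem.List.count r.1 '{' : Int) - (PySem.List.count r.1 '}' : Int)
  let brackets : Int := (PySem.List.count r.1 '[' : Int) - (PySem.List.count r.1 ']' : Int)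
  (max braces 0, max brackets 0, r.2.1)

-- ===== PRECONDITION & SPEC =====
def Spec_count_unclosed_delimiters_py (text : String) (out : Int × Int × Bool) : Prop := out = count_unclosed_delimiters_py_alt text
instance (text : String) (out : Int × Int × Bool) : Decidable (Spec_count_unclosed_delimiters_py text out) := by unfold Spec_count_unclosed_delimiters_py; infer_instance

-- ===== CLAIM =====
def Claim_equal_count_unclosed_delimiters_py : Prop := ∀ (text : String), Dom_count_unclosed_delimiters_py text → Spec_count_unclosed_delimiters_py text (count_unclosed_delimiters_py text)

-- ===== LEMMAS AND PROOFS =====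
-- B's stripping fold is an accumulator homomorphism: the outside-characters list only grows on the right.
theorem pvStepB_acc (acc : List Char) (ins e : Bool) (ch : Char) :
    pvStepB (acc, ins, e) ch = (acc ++ (pvStepB ([], ins, e) ch).1, (pvStepB ([], ins, e) ch).2) := by
  simp only [pvStepB]
  split_ifs <;> simp

theorem foldB_acc (l : List Char) (acc : List Char) (ins e : Bool) :
    l.foldl pvStepB (acc, ins, e) =
      (acc ++ (l.foldl pvStepB ([], ins, e)).1, (l.foldl pvStepB ([], ins, e)).2) := by
  induction l generalizing acc ins e with
  | nil => simp
  | cons ch l ih =>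
    simp only [List.foldl_cons]
    rw [pvStepB_acc]
    rcases h : pvStepB ([], ins, e) ch with ⟨o, ins', e'⟩
    rw [ih (acc ++ o) ins' e', ih o ins' e']
    simp

-- One step of A's counting machine equals one step of B's stripping machine plus counting the (at most one) emitted character.
theorem pvStep_rel (b br : Int) (ins e : Bool) (ch : Char) :
    pvStepA (b, br, ins, e) ch =
      (b + (PySem.List.count (pvStepB ([], ins, e) ch).1 '{' : Int)
         - (PySem.List.count (pvStepB ([], ins, e) ch).1 '}' : Int),
       br + (PySem.List.count (pvStepB ([], ins, e) ch).1 '[' : Int)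
          - (PySem.List.count (pvStepB ([], ins, e) ch).1 ']' : Int),
       (pvStepB ([], ins, e) ch).2) := by
  cases ins <;> cases e <;>
    simp only [pvStepA, pvStepB] <;>
    split_ifs <;>
    simp_all [PySem.List.count_eq]

-- Main invariant: A's fold from any state equals the initial counters plus the delimiter net counts of B's stripped characters.
theorem pv_main (l : List Char) (b br : Int) (ins e : Bool) :
    l.foldl pvStepA (b, br, ins, e) =
      (b + (PySem.List.count (l.foldl pvStepB ([], ins, e)).1 '{' : Int)
         - (PySem.List.count (l.foldl pvStepB ([], ins, e)).1 '}' : Int),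
       br + (PySem.List.count (l.foldl pvStepB ([], ins, e)).1 '[' : Int)
          - (PySem.List.count (l.foldl pvStepB ([], ins, e)).1 ']' : Int),
       (l.foldl pvStepB ([], ins, e)).2) := by
  induction l generalizing b br ins e with
  | nil => simp [PySem.List.count_eq]
  | cons ch l ih =>
    simp only [List.foldl_cons]
    rw [pvStep_rel]
    rcases hB : pvStepB ([], ins, e) ch with ⟨o, ins', e'⟩
    rw [ih, foldB_acc l o ins' e']
    simp only [PySem.List.count_eq, List.count_append, Prod.mk.injEq]
    exact ⟨by push_cast; ring, by push_cast; ring, trivial⟩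

-- ===== VERDICT =====
theorem count_unclosed_delimiters_py_spec : Claim_equal_count_unclosed_delimiters_py := by
  intro text _
  unfold Spec_count_unclosed_delimiters_py count_unclosed_delimiters_py count_unclosed_delimiters_py_alt
  rw [pv_main]
  simp
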